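-- pv_equiv track=rewrite | github.com/Zh-alen/FYP | FYPSignal/transsignal/trans.py | nrzi_encode
-- ===== SOURCE A (Python) =====
-- def nrzi_encode(data_bytes):
--     """NRZI编码"""
--     binary_string = ''.join(format(byte, '08b') for byte in data_bytes)
--     nrzi_encoded = ''
--     current_level = '1'
--     for bit in binary_string:
--         if bit == '0':
--             current_level = '0' if current_level == '1' else '1'
--         nrzi_encoded += current_level
--     return nrzi_encoded, "NRZI encoding"
-- ===== SOURCE B (Python) =====
-- def _encode_bits(bits, level):
--     """Encode one bit-string under NRZI starting from `level`; return (chunk, final level)."""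
--     chunk = []
--     for bit in bits:
--         if bit == '0':
--             level = '0' if level == '1' else '1'
--         chunk.append(level)
--     return ''.join(chunk), level
--
--
-- def nrzi_encode(data_bytes):
--     """NRZI encoding, byte at a time with a (byte, incoming-level) chunk cache."""
--     cache = {}
--     chunks = []
--     level = '1'
--     for byte in data_bytes:
--         key = (byte, level)
--         if key not in cache:
--             cache[key] = _encode_bits(format(byte, '08b'), level)
--         chunk, level = cache[key]
--         chunks.append(chunk)
--     return ''.join(chunks), "NRZI encoding"
-- ===== Notes on version B (the rewrite author's own statement) =====
-- stated objective: alternative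
-- what changed: B encodes byte-by-byte instead of bit-by-bit: a helper maps (byte, incoming level) to an 8-char chunk, results are memoized in a dict keyed by (byte, level), chunks are collected in a list and joined once, replacing A's flat per-bit loop with string concatenation.
import Mathlib
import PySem

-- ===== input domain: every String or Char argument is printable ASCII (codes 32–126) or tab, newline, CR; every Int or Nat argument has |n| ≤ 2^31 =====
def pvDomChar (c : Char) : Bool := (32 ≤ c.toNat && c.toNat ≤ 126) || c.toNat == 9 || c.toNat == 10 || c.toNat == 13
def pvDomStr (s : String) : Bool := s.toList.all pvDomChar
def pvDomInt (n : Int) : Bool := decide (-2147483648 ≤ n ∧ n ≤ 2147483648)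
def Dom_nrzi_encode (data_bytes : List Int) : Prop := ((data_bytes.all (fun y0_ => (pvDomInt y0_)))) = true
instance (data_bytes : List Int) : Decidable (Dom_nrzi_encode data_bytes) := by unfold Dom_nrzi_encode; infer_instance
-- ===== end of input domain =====

-- B replaces A's flat bit-by-bit string loop by per-byte chunk encoding with a (byte, incoming level) cache
-- and a final join (objective: alternative decomposition; return value identical).

-- ===== PORT A =====
-- hand port of Python's format(n, '08b'): binary of |n|, '-' sign included in the 8-char minimum width,
-- zero-padded after the sign; exact for every int (wider than 8 when the digits need it).
def pvBinDigits (n : Nat) : List Char :=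
  if h : n = 0 then [] else pvBinDigits (n / 2) ++ [if n % 2 = 1 then '1' else '0']
decreasing_by exact Nat.div_lt_self (Nat.pos_of_ne_zero h) (by norm_num)

def pvFmt08b (n : Int) : List Char :=
  let d := if n = 0 then ['0'] else pvBinDigits n.natAbs
  let width : Nat := if n < 0 then 7 else 8
  let padded := List.replicate (width - d.length) '0' ++ d
  if n < 0 then '-' :: padded else padded

def nrzi_encode (data_bytes : List Int) : String × String :=
  let binary_string := (data_bytes.map (fun byte => pvFmt08b byte)).flatten
  let st := binary_string.foldl
    (fun (st : List Char × Char) bit =>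
      let lvl := if bit = '0' then (if st.2 = '1' then '0' else '1') else st.2
      (st.1 ++ [lvl], lvl)) ([], '1')
  (String.mk st.1, "NRZI encoding")

-- ===== PORT B =====
-- port of Source B's _encode_bits (chunk list + final level)
def pvEncodeBits (bits : List Char) (level : Char) : List Char × Char :=
  bits.foldl
    (fun (st : List Char × Char) bit =>
      let lvl := if bit = '0' then (if st.2 = '1' then '0' else '1') else st.2
      (st.1 ++ [lvl], lvl)) ([], level)

def nrzi_encode_alt (data_bytes : List Int) : String × String :=
  let st := data_bytes.foldl
    (fun (st : PySem.Dict (Int × Char) (List Char × Char) × List (List Char) × Char) byte =>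
      let key := (byte, st.2.2)
      let cache := if (st.1.get? key).isNone
        then st.1.insert key (pvEncodeBits (pvFmt08b byte) st.2.2) else st.1
      -- cache[key]: the key is always present here, so the default is never used
      let v := (cache.get? key).getD ([], st.2.2)
      (cache, st.2.1 ++ [v.1], v.2))
    (PySem.Dict.empty, [], '1')
  (String.mk st.2.1.flatten, "NRZI encoding")

-- ===== PRECONDITION & SPEC =====
def Spec_nrzi_encode (data_bytes : List Int) (out : String × String) : Prop := out = nrzi_encode_alt data_bytes
instance (data_bytes : List Int) (out : String × String) : Decidable (Spec_nrzi_encode data_bytes out) := by unfold Spec_nrzi_encode; infer_instance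

-- ===== CLAIM (what is proved, stated in full; the proofs are below) =====
def Claim_equal_nrzi_encode : Prop := ∀ (data_bytes : List Int), Dom_nrzi_encode data_bytes → Spec_nrzi_encode data_bytes (nrzi_encode data_bytes)

-- ===== LEMMAS AND PROOFS =====

-- the per-bit NRZI step shared (as source code) by both ports
def pvStep (st : List Char × Char) (bit : Char) : List Char × Char :=
  let lvl := if bit = '0' then (if st.2 = '1' then '0' else '1') else st.2
  (st.1 ++ [lvl], lvl)

-- the cache-free chunked encoding both ports are reduced to
def pvPure : List Int → Char → List (List Char) × Char
  | [], l => ([], l)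
  | b :: bs, l =>
      let c := pvEncodeBits (pvFmt08b b) l
      let r := pvPure bs c.2
      (c.1 :: r.1, r.2)

theorem foldl_pvStep_shape (bits : List Char) : ∀ (acc : List Char) (l : Char),
    bits.foldl pvStep (acc, l) = (acc ++ (pvEncodeBits bits l).1, (pvEncodeBits bits l).2) := by
  induction bits with
  | nil => intro acc l; simp [pvEncodeBits]
  | cons b bs ih =>
      intro acc l
      have h0 : pvEncodeBits (b :: bs) l = bs.foldl pvStep (pvStep ([], l) b) := rfl
      simp only [List.foldl_cons, h0, ih]
      simp [pvStep]

theorem foldl_flat_eq_pvPure (bytes : List Int) : ∀ (acc : List Char) (l : Char),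
    ((bytes.map (fun byte => pvFmt08b byte)).flatten).foldl pvStep (acc, l)
      = (acc ++ (pvPure bytes l).1.flatten, (pvPure bytes l).2) := by
  induction bytes with
  | nil => intro acc l; simp [pvPure]
  | cons b bs ih =>
      intro acc l
      simp only [List.map_cons, List.flatten_cons, List.foldl_append,
        foldl_pvStep_shape, ih, pvPure]
      simp

-- cache invariant: every stored entry is the pure chunk for its key
def pvInv (d : PySem.Dict (Int × Char) (List Char × Char)) : Prop :=
  ∀ b l v, d.get? (b, l) = some v → v = pvEncodeBits (pvFmt08b b) l

def pvBStep
    (st : PySem.Dict (Int × Char) (List Char × Char) × List (List Char) × Char) (byte : Int) :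
    PySem.Dict (Int × Char) (List Char × Char) × List (List Char) × Char :=
  let key := (byte, st.2.2)
  let cache := if (st.1.get? key).isNone
    then st.1.insert key (pvEncodeBits (pvFmt08b byte) st.2.2) else st.1
  let v := (cache.get? key).getD ([], st.2.2)
  (cache, st.2.1 ++ [v.1], v.2)

theorem pvBStep_spec (st : _) (byte : Int) (h : pvInv st.1) :
    (pvBStep st byte).2 = (st.2.1 ++ [(pvEncodeBits (pvFmt08b byte) st.2.2).1],
      (pvEncodeBits (pvFmt08b byte) st.2.2).2) ∧ pvInv (pvBStep st byte).1 := by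
  obtain ⟨d, cs, l⟩ := st
  cases hc : d.get? (byte, l) with
  | some v =>
      have hv := h byte l v hc
      constructor
      · simp [pvBStep, hc, hv]
      · simpa [pvBStep, hc] using h
  | none =>
      have hself : (d.insert (byte, l) (pvEncodeBits (pvFmt08b byte) l)).get? (byte, l)
          = some (pvEncodeBits (pvFmt08b byte) l) := PySem.Dict.get?_insert_self ..
      constructor
      · simp [pvBStep, hc, hself]
      · intro b' l' v' hget
        simp only [pvBStep, hc, Option.isNone_none, if_true] at hget
        rw [PySem.Dict.get?_insert] at hget
        by_cases hk : (b', l') = (byte, l)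
        · injection hk with h1 h2
          subst h1; subst h2
          simp at hget
          exact hget.symm
        · exact h b' l' v' (by simpa [hk] using hget)

theorem foldl_pvBStep_eq_pvPure (bytes : List Int) :
    ∀ (d : PySem.Dict (Int × Char) (List Char × Char)) (cs : List (List Char)) (l : Char),
    pvInv d →
    (bytes.foldl pvBStep (d, cs, l)).2 = (cs ++ (pvPure bytes l).1, (pvPure bytes l).2) := by
  induction bytes with
  | nil => intro d cs l _; simp [pvPure]
  | cons b bs ih =>
      intro d cs l hinv
      obtain ⟨hval, hinv'⟩ := pvBStep_spec (d, cs, l) b hinv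
      simp only [List.foldl_cons]
      have hrec := ih (pvBStep (d, cs, l) b).1 (pvBStep (d, cs, l) b).2.1
        (pvBStep (d, cs, l) b).2.2 hinv'
      rw [show ((pvBStep (d, cs, l) b).1, (pvBStep (d, cs, l) b).2.1,
        (pvBStep (d, cs, l) b).2.2) = pvBStep (d, cs, l) b from rfl] at hrec
      have h1 : (pvBStep (d, cs, l) b).2.1 = cs ++ [(pvEncodeBits (pvFmt08b b) l).1] := by
        rw [hval]
      have h2 : (pvBStep (d, cs, l) b).2.2 = (pvEncodeBits (pvFmt08b b) l).2 := by
        rw [hval]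
      rw [hrec, h1, h2]
      simp [pvPure]

theorem pvInv_empty : pvInv PySem.Dict.empty := by
  intro b l v h; simp [PySem.Dict.get?_empty] at h

-- ===== VERDICT (by name: the statement is the Claim_ definition above) =====
theorem nrzi_encode_spec : Claim_equal_nrzi_encode := by
  intro data_bytes _
  unfold Spec_nrzi_encode nrzi_encode nrzi_encode_alt
  have hA : (fun (st : List Char × Char) bit =>
      let lvl := if bit = '0' then (if st.2 = '1' then '0' else '1') else st.2
      (st.1 ++ [lvl], lvl)) = pvStep := rfl
  have hB : (fun (st : PySem.Dict (Int × Char) (List Char × Char) × List (List Char) × Char) byte =>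
      let key := (byte, st.2.2)
      let cache := if (st.1.get? key).isNone
        then st.1.insert key (pvEncodeBits (pvFmt08b byte) st.2.2) else st.1
      let v := (cache.get? key).getD ([], st.2.2)
      (cache, st.2.1 ++ [v.1], v.2)) = pvBStep := rfl
  simp only [hA, hB, foldl_flat_eq_pvPure,
    foldl_pvBStep_eq_pvPure data_bytes PySem.Dict.empty [] '1' pvInv_empty]
  simp
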